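-- pv_equiv track=rewrite | github.com/ABRJrocks/Enigma-Language-Compiler-In-Python--Tokenizer--Parser--Semantic--Code-Gen--Output- | optimizer.py | peephole_optimization
-- ===== SOURCE A (Python) =====
-- def peephole_optimization(instructions):
--     optimized_instructions = []
--     i = 0
--     while i < len(instructions):
--         if i < len(instructions) - 1:
--             inst1 = instructions[i]
--             inst2 = instructions[i + 1]
--             if inst1.startswith("LOAD") and inst2.startswith("STORE"):
--                 parts1 = inst1.split()
--                 parts2 = inst2.split()
--                 if parts1[1] == parts2[1]:
--                     optimized_instructions.append(
--                         f"MOV {parts1[1]}, {parts2[2]}")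
--                     i += 2
--                     continue
--         optimized_instructions.append(instructions[i])
--         i += 1
--     return optimized_instructions
-- ===== SOURCE B (Python) =====
-- def peephole_optimization(instructions):
--     result = []
--     for inst in instructions:
--         if inst.startswith("STORE") and result and result[-1].startswith("LOAD"):
--             parts_load = result[-1].split()
--             parts_store = inst.split()
--             if parts_load[1] == parts_store[1]:
--                 result[-1] = f"MOV {parts_load[1]}, {parts_store[2]}"
--                 continue
--         result.append(inst)
--     return result
-- ===== Notes on version B (the rewrite author's own statement) =====
-- stated objective: alternative
-- what changed: Replaces A's index-based while loop with look-ahead and i+=2 skipping by a single for-loop that uses the output list as a stack, merging a STORE with the trailing LOAD of the accumulator by replacing it in place (look-behind instead of look-ahead).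
import Mathlib
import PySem

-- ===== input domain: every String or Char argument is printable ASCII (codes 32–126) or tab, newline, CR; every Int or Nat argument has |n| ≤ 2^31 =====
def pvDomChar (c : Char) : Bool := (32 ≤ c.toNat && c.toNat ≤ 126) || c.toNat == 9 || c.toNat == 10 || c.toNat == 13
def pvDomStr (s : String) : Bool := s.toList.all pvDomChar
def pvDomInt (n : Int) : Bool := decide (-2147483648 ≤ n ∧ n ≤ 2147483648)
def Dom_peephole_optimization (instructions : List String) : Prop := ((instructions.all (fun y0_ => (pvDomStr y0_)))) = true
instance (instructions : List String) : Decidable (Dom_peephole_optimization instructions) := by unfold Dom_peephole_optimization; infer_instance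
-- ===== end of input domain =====

-- B replaces A's index-based look-ahead while loop (i += 2 skip) by a single pass that treats the
-- output list as a stack and merges a STORE into the trailing LOAD (look-behind); equal return values.

-- ===== PORT A =====
-- while loop with look-ahead, transcribed as structural recursion on the remaining instructions
def pa_go : List String → List String
  | [] => []
  | [x] => [x]
  | x :: y :: rest =>
    if PySem.Str.startswith x "LOAD" && PySem.Str.startswith y "STORE" then
      match PySem.List.pyGet? (PySem.Str.split₀ x) 1, PySem.List.pyGet? (PySem.Str.split₀ y) 1 with
      | some p1, some p2 =>
        if p1 = p2 then
          match PySem.List.pyGet? (PySem.Str.split₀ y) 2 with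
          | some q => ("MOV " ++ p1 ++ ", " ++ q) :: pa_go rest
          | none => []                   -- Python raises IndexError here (outside Pre_)
        else x :: pa_go (y :: rest)
      | _, _ => []                       -- Python raises IndexError here (outside Pre_)
    else x :: pa_go (y :: rest)

def peephole_optimization (instructions : List String) : List String :=
  pa_go instructions

-- ===== PORT B =====
-- one step of B's for-loop: the accumulated output is used as a stack (look-behind merge)
def pb_step (result : List String) (inst : String) : List String :=
  if PySem.Str.startswith inst "STORE" && !result.isEmpty &&
     PySem.Str.startswith (result.getLastD "") "LOAD" then
    match PySem.List.pyGet? (PySem.Str.split₀ (result.getLastD "")) 1,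
          PySem.List.pyGet? (PySem.Str.split₀ inst) 1 with
    | some a, some b =>
      if a = b then
        match PySem.List.pyGet? (PySem.Str.split₀ inst) 2 with
        | some c => result.dropLast ++ ["MOV " ++ a ++ ", " ++ c]
        | none => result ++ [inst]       -- Python raises IndexError here (outside Pre_)
      else result ++ [inst]
    | _, _ => result ++ [inst]           -- Python raises IndexError here (outside Pre_)
  else result ++ [inst]

def peephole_optimization_alt (instructions : List String) : List String :=
  instructions.foldl pb_step []

-- ===== PRECONDITION & SPEC =====
-- an adjacent pair is OK unless it is a LOAD followed by a STORE whose token accesses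
-- parts1[1], parts2[1] (and, on equality, parts2[2]) would raise IndexError
def pvOk (a b : String) : Bool :=
  !(PySem.Str.startswith a "LOAD" && PySem.Str.startswith b "STORE") ||
  (match PySem.List.pyGet? (PySem.Str.split₀ a) 1, PySem.List.pyGet? (PySem.Str.split₀ b) 1 with
   | some p1, some p2 => p1 != p2 || (PySem.List.pyGet? (PySem.Str.split₀ b) 2).isSome
   | _, _ => false)

-- Pre_ excludes exactly the inputs on which A (and B) raise IndexError: an adjacent
-- LOAD/STORE pair with too few whitespace tokens for the accesses parts[1]/parts[2]
def Pre_peephole_optimization (instructions : List String) : Prop :=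
  List.IsChain (fun a b => pvOk a b = true) instructions

instance (instructions : List String) : Decidable (Pre_peephole_optimization instructions) := by
  unfold Pre_peephole_optimization; infer_instance

def pvWitness_peephole_optimization : List String := ["LOAD x", "STORE x y", "ADD"]

def Spec_peephole_optimization (instructions : List String) (out : List String) : Prop := out = peephole_optimization_alt instructions
instance (instructions : List String) (out : List String) : Decidable (Spec_peephole_optimization instructions out) := by unfold Spec_peephole_optimization; infer_instance

-- ===== CLAIM (what is proved, stated in full; the proofs are below) =====
def Claim_equal_peephole_optimization : Prop := ∀ (instructions : List String), Dom_peephole_optimization instructions → Pre_peephole_optimization instructions → Spec_peephole_optimization instructions (peephole_optimization instructions)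

-- ===== LEMMAS AND PROOFS =====
lemma mov_not_load (a c : String) :
    PySem.Str.startswith ("MOV " ++ a ++ ", " ++ c) "LOAD" = false := by
  rw [Bool.eq_false_iff]
  intro h
  rw [PySem.Str.startswith_eq, PySem.Chars.startswith_iff] at h
  obtain ⟨t, ht⟩ := h
  have h2 : ("MOV " ++ a ++ ", " ++ c).toList
      = 'M' :: 'O' :: 'V' :: ' ' :: (a.toList ++ ", ".toList ++ c.toList) := by
    simp [String.toList_append]
  rw [h2] at ht
  simp at ht

-- a step whose merge branch cannot fire is an append
lemma pb_step_append (acc : List String) (x : String)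
    (h : PySem.Str.startswith x "STORE" = false ∨
         PySem.Str.startswith (acc.getLastD "") "LOAD" = false) :
    pb_step acc x = acc ++ [x] := by
  unfold pb_step
  rcases h with h | h <;> simp at h <;> simp [h]

lemma pb_go_eq : ∀ (xs acc : List String),
    List.IsChain (fun a b => pvOk a b = true) xs →
    (∀ x ∈ xs.head?, pb_step acc x = acc ++ [x]) →
    xs.foldl pb_step acc = acc ++ pa_go xs := by
  intro xs
  induction xs using pa_go.induct with
  | case1 => intro acc _ _; simp [pa_go]
  | case2 x => intro acc _ hstep; simpa [pa_go] using hstep x rfl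
  | case3 x y rest hcond p2 hp2 q hq hp1 ih =>
    intro acc hchain hstep
    obtain ⟨hload, hstore⟩ : _ ∧ _ := by simpa using hcond
    have hx : pb_step acc x = acc ++ [x] := hstep x rfl
    have hy : pb_step (acc ++ [x]) y = acc ++ ["MOV " ++ p2 ++ ", " ++ q] := by
      unfold pb_step
      simp [hstore, hload, hp1, hp2, hq]
    have hrest : rest.foldl pb_step (acc ++ ["MOV " ++ p2 ++ ", " ++ q])
        = (acc ++ ["MOV " ++ p2 ++ ", " ++ q]) ++ pa_go rest := by
      refine ih _ ((List.isChain_cons_cons.mp hchain).2.tail) ?_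
      intro z _
      refine pb_step_append _ z (Or.inr ?_)
      rw [List.getLastD_concat]
      exact mov_not_load p2 q
    have hgo : pa_go (x :: y :: rest) = ("MOV " ++ p2 ++ ", " ++ q) :: pa_go rest := by
      simp [pa_go, hload, hstore, hp1, hp2, hq]
    simp only [List.foldl_cons, hx, hy, hrest, hgo]
    simp
  | case4 x y rest hcond p2 hp2 hq hp1 =>
    intro acc hchain _
    have hxy : pvOk x y = true := (List.isChain_cons_cons.mp hchain).1
    obtain ⟨hload, hstore⟩ : _ ∧ _ := by simpa using hcond
    unfold pvOk at hxy
    simp [hload, hstore, hp1, hp2, hq] at hxy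
  | case5 x y rest hcond p1 p2 hp2 hp1 hne ih =>
    intro acc hchain hstep
    obtain ⟨hload, hstore⟩ : _ ∧ _ := by simpa using hcond
    have hx : pb_step acc x = acc ++ [x] := hstep x rfl
    have hy : pb_step (acc ++ [x]) y = (acc ++ [x]) ++ [y] := by
      unfold pb_step
      simp [hstore, hload, hp1, hp2, hne]
    have hrest : (y :: rest).foldl pb_step (acc ++ [x]) = (acc ++ [x]) ++ pa_go (y :: rest) := by
      refine ih _ (List.isChain_cons_cons.mp hchain).2 ?_
      intro z hz
      obtain rfl : y = z := by simpa using hz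
      exact hy
    have hgo : pa_go (x :: y :: rest) = x :: pa_go (y :: rest) := by
      simp [pa_go, hload, hstore, hp1, hp2, hne]
    simp only [List.foldl_cons, hx, hrest, hgo]
    simp
  | case6 x y rest hcond hfail =>
    intro acc hchain _
    have hxy : pvOk x y = true := (List.isChain_cons_cons.mp hchain).1
    obtain ⟨hload, hstore⟩ : _ ∧ _ := by simpa using hcond
    unfold pvOk at hxy
    cases h1 : PySem.List.pyGet? (PySem.Str.split₀ x) 1 with
    | some p1 =>
      cases h2 : PySem.List.pyGet? (PySem.Str.split₀ y) 1 with
      | some p2 => exact (hfail p1 p2 h1 h2).elim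
      | none => simp [hload, hstore, h1, h2] at hxy
    | none => simp [hload, hstore, h1] at hxy
  | case7 x y rest hcond ih =>
    intro acc hchain hstep
    have hx : pb_step acc x = acc ++ [x] := hstep x rfl
    have hy : pb_step (acc ++ [x]) y = (acc ++ [x]) ++ [y] := by
      cases hl : PySem.Str.startswith x "LOAD" with
      | false =>
        refine pb_step_append _ y (Or.inr ?_)
        rw [List.getLastD_concat]; exact hl
      | true =>
        cases hs : PySem.Str.startswith y "STORE" with
        | false => exact pb_step_append _ y (Or.inl hs)
        | true => exact absurd (by rw [hl, hs]; rfl) hcond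
    have hrest : (y :: rest).foldl pb_step (acc ++ [x]) = (acc ++ [x]) ++ pa_go (y :: rest) := by
      refine ih _ (List.isChain_cons_cons.mp hchain).2 ?_
      intro z hz
      obtain rfl : y = z := by simpa using hz
      exact hy
    have hgo : pa_go (x :: y :: rest) = x :: pa_go (y :: rest) := by
      simp only [pa_go, if_neg hcond]
    simp only [List.foldl_cons, hx, hrest, hgo]
    simp

-- ===== VERDICT (by name: the statement is the Claim_ definition above) =====
theorem peephole_optimization_spec : Claim_equal_peephole_optimization := by
  intro xs _ hpre
  unfold Spec_peephole_optimization peephole_optimization peephole_optimization_alt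
  have h := pb_go_eq xs [] hpre ?_
  · simpa using h.symm
  · intro x _
    unfold pb_step
    simp
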